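-- pv_equiv track=rewrite | github.com/Zaen1993/System-Updates | server/intelligence/keylogger_analyzer.py | clean_keystrokes
-- ===== SOURCE A (Python) =====
-- def clean_keystrokes(raw: str) -> str:
--     replacements = {
--         '[SPACE]': ' ',
--         '[ENTER]': '\n',
--         '[TAB]': '\t',
--         '[BACKSPACE]': '',
--     }
--     for token, repl in replacements.items():
--         raw = raw.replace(token, repl)
--     return raw
-- ===== SOURCE B (Python) =====
-- def clean_keystrokes(raw: str) -> str:
--     out = []
--     i = 0
--     n = len(raw)
--     while i < n:
--         if raw.startswith('[SPACE]', i):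
--             out.append(' '); i += 7
--         elif raw.startswith('[ENTER]', i):
--             out.append('\n'); i += 7
--         elif raw.startswith('[TAB]', i):
--             out.append('\t'); i += 5
--         elif raw.startswith('[BACKSPACE]', i):
--             i += 11
--         else:
--             out.append(raw[i]); i += 1
--     return ''.join(out)
-- ===== Notes on version B (the rewrite author's own statement) =====
-- stated objective: alternative
-- what changed: Replaces four sequential full-string replace passes by a single left-to-right scan that matches each token once at the current position and emits its replacement, building the output in one pass.
import Mathlib
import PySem

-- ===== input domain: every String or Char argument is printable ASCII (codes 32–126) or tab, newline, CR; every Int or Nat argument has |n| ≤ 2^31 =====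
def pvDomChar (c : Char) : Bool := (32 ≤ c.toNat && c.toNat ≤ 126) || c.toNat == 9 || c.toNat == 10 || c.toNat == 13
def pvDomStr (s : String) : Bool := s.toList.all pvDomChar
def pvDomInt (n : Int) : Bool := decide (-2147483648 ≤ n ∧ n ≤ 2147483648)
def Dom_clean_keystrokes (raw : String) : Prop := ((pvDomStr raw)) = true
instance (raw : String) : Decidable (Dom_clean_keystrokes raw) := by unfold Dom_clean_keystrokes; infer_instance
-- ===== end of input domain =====

-- B replaces A's four sequential full-string replace passes by a single left-to-right token scan (objective: alternative, one pass instead of four).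

set_option maxRecDepth 4000

-- ===== PORT A =====
def clean_keystrokes (raw : String) : String :=
  let raw1 := PySem.Str.replace raw "[SPACE]" " "
  let raw2 := PySem.Str.replace raw1 "[ENTER]" "\n"
  let raw3 := PySem.Str.replace raw2 "[TAB]" "\t"
  PySem.Str.replace raw3 "[BACKSPACE]" ""

-- ===== PORT B =====
def tokSP : List Char := ['[', 'S', 'P', 'A', 'C', 'E', ']']
def tokEN : List Char := ['[', 'E', 'N', 'T', 'E', 'R', ']']
def tokTB : List Char := ['[', 'T', 'A', 'B', ']']
def tokBS : List Char := ['[', 'B', 'A', 'C', 'K', 'S', 'P', 'A', 'C', 'E', ']']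

-- single left-to-right scan, one branch per token in Source B's order
def scanKeys : List Char → List Char
  | [] => []
  | c :: t =>
    if tokSP.isPrefixOf (c :: t) then ' ' :: scanKeys (t.drop 6)
    else if tokEN.isPrefixOf (c :: t) then '\n' :: scanKeys (t.drop 6)
    else if tokTB.isPrefixOf (c :: t) then '\t' :: scanKeys (t.drop 4)
    else if tokBS.isPrefixOf (c :: t) then scanKeys (t.drop 10)
    else c :: scanKeys t
termination_by l => l.length
decreasing_by all_goals (simp; try omega)

def clean_keystrokes_alt (raw : String) : String :=
  String.ofList (scanKeys raw.toList)

-- ===== PRECONDITION & SPEC =====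
def Spec_clean_keystrokes (raw : String) (out : String) : Prop := out = clean_keystrokes_alt raw
instance (raw : String) (out : String) : Decidable (Spec_clean_keystrokes raw out) := by unfold Spec_clean_keystrokes; infer_instance

-- ===== CLAIM (what is proved, stated in full; the proofs are below) =====
def Claim_equal_clean_keystrokes : Prop := ∀ (raw : String), Dom_clean_keystrokes raw → Spec_clean_keystrokes raw (clean_keystrokes raw)

-- ===== LEMMAS AND PROOFS =====

-- proof-only model of one replace pass, structural on the string
def rep1 (old new : List Char) : List Char → List Char
  | [] => []
  | c :: t =>
    if old.isPrefixOf (c :: t) then new ++ rep1 old new (t.drop (old.length - 1))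
    else c :: rep1 old new t
termination_by l => l.length
decreasing_by all_goals (simp; try omega)

lemma scanKeys_cons (c : Char) (t : List Char) :
    scanKeys (c :: t) =
      if tokSP.isPrefixOf (c :: t) then ' ' :: scanKeys (t.drop 6)
      else if tokEN.isPrefixOf (c :: t) then '\n' :: scanKeys (t.drop 6)
      else if tokTB.isPrefixOf (c :: t) then '\t' :: scanKeys (t.drop 4)
      else if tokBS.isPrefixOf (c :: t) then scanKeys (t.drop 10)
      else c :: scanKeys t := by
  rw [scanKeys.eq_def]

lemma go_spec (old new : List Char) (h : old ≠ []) :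
    ∀ (fuel : Nat) (l acc : List Char), l.length ≤ fuel →
      PySem.Chars.replace.go old new fuel l acc = acc.reverse ++ rep1 old new l := by
  intro fuel
  induction fuel with
  | zero =>
    intro l acc hl
    have : l = [] := by cases l <;> simp_all
    subst this
    simp [PySem.Chars.replace.go, rep1]
  | succ n ih =>
    intro l acc hl
    cases l with
    | nil => simp [PySem.Chars.replace.go, rep1]
    | cons c t =>
      rw [PySem.Chars.replace.go, rep1]
      by_cases hp : old.isPrefixOf (c :: t)
      · rw [if_pos hp, if_pos hp]
        obtain ⟨o, os, ho⟩ : ∃ o os, old = o :: os := by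
          cases old with
          | nil => exact absurd rfl h
          | cons o os => exact ⟨o, os, rfl⟩
        have hdrop : (c :: t).drop old.length = t.drop (old.length - 1) := by
          subst ho; simp
        rw [hdrop, ih _ _ (by simp at hl ⊢; omega)]
        simp
      · rw [if_neg hp, if_neg hp, ih _ _ (by simp at hl; omega)]
        simp

lemma replace_eq_rep1 (s old new : List Char) (h : old ≠ []) :
    PySem.Chars.replace s old new = rep1 old new s := by
  rw [PySem.Chars.replace, if_neg (by simpa using h)]
  simpa using go_spec old new h s.length s [] le_rfl

lemma rep1_cons_of_not_prefix (old new : List Char) (c : Char) (t : List Char)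
    (h : ¬ old.isPrefixOf (c :: t)) : rep1 old new (c :: t) = c :: rep1 old new t := by
  rw [rep1, if_neg h]

lemma rep1_cons_char (old new os : List Char) (h : old = '[' :: os) (a : Char)
    (ha : a ≠ '[') (u : List Char) : rep1 old new (a :: u) = a :: rep1 old new u := by
  apply rep1_cons_of_not_prefix
  subst h
  simp [List.isPrefixOf_iff_prefix, List.cons_prefix_cons]
  intro hc
  exact absurd hc.symm ha

lemma rep1_append_of_avoid (old new os : List Char) (h : old = '[' :: os) :
    ∀ (w u : List Char), (∀ c ∈ w, c ≠ '[') →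
      rep1 old new (w ++ u) = w ++ rep1 old new u := by
  intro w
  induction w with
  | nil => intro u _; simp
  | cons a w' ih =>
    intro u hw
    rw [List.cons_append, rep1_cons_char old new os h a (hw a (by simp)) (w' ++ u),
      ih u (fun c hc => hw c (by simp [hc]))]
    simp

lemma rep1_exact (old new : List Char) (h : old ≠ []) (u : List Char) :
    rep1 old new (old ++ u) = new ++ rep1 old new u := by
  obtain ⟨o, os, ho⟩ : ∃ o os, old = o :: os := by
    cases old with
    | nil => exact absurd rfl h
    | cons o os => exact ⟨o, os, rfl⟩
  subst ho
  rw [List.cons_append, rep1, if_pos (by simp [List.isPrefixOf_iff_prefix])]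
  congr 1
  have hlen : ((o :: os).length - 1) = os.length := by simp
  rw [hlen]
  congr 1
  simpa using List.drop_left os u

-- a prefix w avoiding '[' and the replacement chars survives (in both directions) a rep1 pass with nonempty replacement
lemma prefix_rep1_iff (old new os : List Char) (hold : old = '[' :: os) (hnew : new ≠ []) :
    ∀ (n : Nat) (u w : List Char), u.length ≤ n → (∀ c ∈ w, c ≠ '[' ∧ c ∉ new) →
      (w <+: rep1 old new u ↔ w <+: u) := by
  intro n
  induction n with
  | zero =>
    intro u w hu _
    have : u = [] := by cases u <;> simp_all
    subst this
    simp [rep1]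
  | succ n ih =>
    intro u w hu hw
    cases u with
    | nil => simp [rep1]
    | cons c t =>
      rw [rep1]
      by_cases hp : old.isPrefixOf (c :: t)
      · rw [if_pos hp]
        cases w with
        | nil => simp
        | cons a w' =>
          obtain ⟨n0, ns, hn⟩ : ∃ n0 ns, new = n0 :: ns := by
            cases new with
            | nil => exact absurd rfl hnew
            | cons n0 ns => exact ⟨n0, ns, rfl⟩
          have hc : c = '[' := by
            rw [List.isPrefixOf_iff_prefix, hold, List.cons_prefix_cons] at hp
            exact hp.1.symm
          constructor
          · intro hpre
            rw [hn, List.cons_append, List.cons_prefix_cons] at hpre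
            exact absurd (hpre.1 ▸ (by rw [hn]; simp : n0 ∈ new)) (hw a (by simp)).2
          · intro hpre
            rw [List.cons_prefix_cons] at hpre
            exact absurd (hpre.1.trans hc) (hw a (by simp)).1
      · rw [if_neg hp]
        cases w with
        | nil => simp
        | cons a w' =>
          rw [List.cons_prefix_cons, List.cons_prefix_cons,
            ih t w' (by simp at hu; omega) (fun c hc => hw c (by simp [hc]))]

-- the composite of A's four passes
def chainR (u : List Char) : List Char :=
  rep1 tokBS [] (rep1 tokTB ['\t'] (rep1 tokEN ['\n'] (rep1 tokSP [' '] u)))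

lemma chain_eq_scan : ∀ (n : Nat) (u : List Char), u.length ≤ n → chainR u = scanKeys u := by
  intro n
  induction n with
  | zero =>
    intro u hu
    have : u = [] := by cases u <;> simp_all
    subst this
    simp [chainR, rep1, scanKeys]
  | succ n ih =>
    intro u hu
    cases u with
    | nil => simp [chainR, rep1, scanKeys]
    | cons c t =>
      by_cases h1 : tokSP.isPrefixOf (c :: t)
      · obtain ⟨r, hr⟩ := (List.isPrefixOf_iff_prefix.mp h1)
        have hc : c = '[' ∧ t = ['S', 'P', 'A', 'C', 'E', ']'] ++ r := by
          rw [tokSP] at hr; simp at hr; exact ⟨hr.1.symm, hr.2.symm⟩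
        have hlen : r.length ≤ n := by
          have hl := congrArg List.length hc.2
          simp at hl; simp at hu; omega
        have hihr := ih r hlen
        rw [chainR] at hihr
        have hu' : (c : Char) :: t = tokSP ++ r := hr.symm
        rw [chainR, hu',
          rep1_exact tokSP [' '] (by decide) r,
          List.singleton_append,
          rep1_cons_char tokEN ['\n'] ['E','N','T','E','R',']'] rfl ' ' (by decide) _,
          rep1_cons_char tokTB ['\t'] ['T','A','B',']'] rfl ' ' (by decide) _,
          rep1_cons_char tokBS [] ['B','A','C','K','S','P','A','C','E',']'] rfl ' ' (by decide) _,
          hihr, ← hu', scanKeys_cons, if_pos h1]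
        have hdrop : t.drop 6 = r := by
          rw [hc.2]; simpa using List.drop_left ['S','P','A','C','E',']'] r
        rw [hdrop]
      · by_cases h2 : tokEN.isPrefixOf (c :: t)
        · obtain ⟨r, hr⟩ := (List.isPrefixOf_iff_prefix.mp h2)
          have hc : c = '[' ∧ t = ['E', 'N', 'T', 'E', 'R', ']'] ++ r := by
            rw [tokEN] at hr; simp at hr; exact ⟨hr.1.symm, hr.2.symm⟩
          have hlen : r.length ≤ n := by
            have hl := congrArg List.length hc.2
            simp at hl; simp at hu; omega
          have hihr := ih r hlen
          rw [chainR] at hihr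
          have hSP : rep1 tokSP [' '] (c :: t) = tokEN ++ rep1 tokSP [' '] r := by
            rw [rep1_cons_of_not_prefix tokSP [' '] c t h1, hc.2,
              rep1_append_of_avoid tokSP [' '] ['S','P','A','C','E',']'] rfl _ r (by simp), hc.1, tokEN]
            simp
          rw [chainR, hSP,
            rep1_exact tokEN ['\n'] (by decide) _,
            List.singleton_append,
            rep1_cons_char tokTB ['\t'] ['T','A','B',']'] rfl '\n' (by decide) _,
            rep1_cons_char tokBS [] ['B','A','C','K','S','P','A','C','E',']'] rfl '\n' (by decide) _,
            hihr, scanKeys_cons, if_neg h1, if_pos h2]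
          have hdrop : t.drop 6 = r := by
            rw [hc.2]; simpa using List.drop_left ['E','N','T','E','R',']'] r
          rw [hdrop]
        · by_cases h3 : tokTB.isPrefixOf (c :: t)
          · obtain ⟨r, hr⟩ := (List.isPrefixOf_iff_prefix.mp h3)
            have hc : c = '[' ∧ t = ['T', 'A', 'B', ']'] ++ r := by
              rw [tokTB] at hr; simp at hr; exact ⟨hr.1.symm, hr.2.symm⟩
            have hlen : r.length ≤ n := by
              have hl := congrArg List.length hc.2
              simp at hl; simp at hu; omega
            have hihr := ih r hlen
            rw [chainR] at hihr
            have hSP : rep1 tokSP [' '] (c :: t) = tokTB ++ rep1 tokSP [' '] r := by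
              rw [rep1_cons_of_not_prefix tokSP [' '] c t h1, hc.2,
                rep1_append_of_avoid tokSP [' '] ['S','P','A','C','E',']'] rfl _ r (by simp), hc.1, tokTB]
              simp
            have hEN : rep1 tokEN ['\n'] (tokTB ++ rep1 tokSP [' '] r)
                = tokTB ++ rep1 tokEN ['\n'] (rep1 tokSP [' '] r) := by
              rw [tokTB, List.cons_append,
                rep1_cons_of_not_prefix tokEN ['\n'] '[' _
                  (by simp [tokEN, List.isPrefixOf_iff_prefix, List.cons_prefix_cons]),
                rep1_append_of_avoid tokEN ['\n'] ['E','N','T','E','R',']'] rfl ['T','A','B',']'] _ (by simp)]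
              simp
            rw [chainR, hSP, hEN,
              rep1_exact tokTB ['\t'] (by decide) _,
              List.singleton_append,
              rep1_cons_char tokBS [] ['B','A','C','K','S','P','A','C','E',']'] rfl '\t' (by decide) _,
              hihr, scanKeys_cons, if_neg h1, if_neg h2, if_pos h3]
            have hdrop : t.drop 4 = r := by
              rw [hc.2]; simpa using List.drop_left ['T','A','B',']'] r
            rw [hdrop]
          · by_cases h4 : tokBS.isPrefixOf (c :: t)
            · obtain ⟨r, hr⟩ := (List.isPrefixOf_iff_prefix.mp h4)
              have hc : c = '[' ∧ t = ['B', 'A', 'C', 'K', 'S', 'P', 'A', 'C', 'E', ']'] ++ r := by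
                rw [tokBS] at hr; simp at hr; exact ⟨hr.1.symm, hr.2.symm⟩
              have hlen : r.length ≤ n := by
                have hl := congrArg List.length hc.2
                simp at hl; simp at hu; omega
              have hihr := ih r hlen
              rw [chainR] at hihr
              have hSP : rep1 tokSP [' '] (c :: t) = tokBS ++ rep1 tokSP [' '] r := by
                rw [rep1_cons_of_not_prefix tokSP [' '] c t h1, hc.2,
                  rep1_append_of_avoid tokSP [' '] ['S','P','A','C','E',']'] rfl _ r (by simp), hc.1, tokBS]
                simp
              have hEN : rep1 tokEN ['\n'] (tokBS ++ rep1 tokSP [' '] r)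
                  = tokBS ++ rep1 tokEN ['\n'] (rep1 tokSP [' '] r) := by
                rw [tokBS, List.cons_append,
                  rep1_cons_of_not_prefix tokEN ['\n'] '[' _
                    (by simp [tokEN, List.isPrefixOf_iff_prefix, List.cons_prefix_cons]),
                  rep1_append_of_avoid tokEN ['\n'] ['E','N','T','E','R',']'] rfl ['B','A','C','K','S','P','A','C','E',']'] _ (by simp)]
                simp
              have hTB : rep1 tokTB ['\t'] (tokBS ++ rep1 tokEN ['\n'] (rep1 tokSP [' '] r))
                  = tokBS ++ rep1 tokTB ['\t'] (rep1 tokEN ['\n'] (rep1 tokSP [' '] r)) := by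
                rw [tokBS, List.cons_append,
                  rep1_cons_of_not_prefix tokTB ['\t'] '[' _
                    (by simp [tokTB, List.isPrefixOf_iff_prefix, List.cons_prefix_cons]),
                  rep1_append_of_avoid tokTB ['\t'] ['T','A','B',']'] rfl ['B','A','C','K','S','P','A','C','E',']'] _ (by simp)]
                simp
              rw [chainR, hSP, hEN, hTB,
                rep1_exact tokBS [] (by decide) _,
                List.nil_append,
                hihr, scanKeys_cons, if_neg h1, if_neg h2, if_neg h3, if_pos h4]
              have hdrop : t.drop 10 = r := by
                rw [hc.2]; simpa using List.drop_left ['B','A','C','K','S','P','A','C','E',']'] r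
              rw [hdrop]
            · -- no token matches at this position: every pass steps one char
              have hlen : t.length ≤ n := by simp at hu; omega
              have hihr := ih t hlen
              rw [chainR] at hihr
              have hSP : rep1 tokSP [' '] (c :: t) = c :: rep1 tokSP [' '] t :=
                rep1_cons_of_not_prefix _ _ _ _ h1
              have hENpre : ¬ tokEN.isPrefixOf (c :: rep1 tokSP [' '] t) := by
                rw [List.isPrefixOf_iff_prefix, tokEN, List.cons_prefix_cons]
                rintro ⟨hcc, hbody⟩
                rw [prefix_rep1_iff tokSP [' '] ['S','P','A','C','E',']'] rfl (by decide) t.length t _ le_rfl (by simp)] at hbody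
                exact h2 (by rw [List.isPrefixOf_iff_prefix, tokEN, List.cons_prefix_cons]; exact ⟨hcc, hbody⟩)
              have hTBpre : ¬ tokTB.isPrefixOf (c :: rep1 tokEN ['\n'] (rep1 tokSP [' '] t)) := by
                rw [List.isPrefixOf_iff_prefix, tokTB, List.cons_prefix_cons]
                rintro ⟨hcc, hbody⟩
                rw [prefix_rep1_iff tokEN ['\n'] ['E','N','T','E','R',']'] rfl (by decide) _ _ _ le_rfl (by simp)] at hbody
                rw [prefix_rep1_iff tokSP [' '] ['S','P','A','C','E',']'] rfl (by decide) _ _ _ le_rfl (by simp)] at hbody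
                exact h3 (by rw [List.isPrefixOf_iff_prefix, tokTB, List.cons_prefix_cons]; exact ⟨hcc, hbody⟩)
              have hBSpre : ¬ tokBS.isPrefixOf
                  (c :: rep1 tokTB ['\t'] (rep1 tokEN ['\n'] (rep1 tokSP [' '] t))) := by
                rw [List.isPrefixOf_iff_prefix, tokBS, List.cons_prefix_cons]
                rintro ⟨hcc, hbody⟩
                rw [prefix_rep1_iff tokTB ['\t'] ['T','A','B',']'] rfl (by decide) _ _ _ le_rfl (by simp)] at hbody
                rw [prefix_rep1_iff tokEN ['\n'] ['E','N','T','E','R',']'] rfl (by decide) _ _ _ le_rfl (by simp)] at hbody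
                rw [prefix_rep1_iff tokSP [' '] ['S','P','A','C','E',']'] rfl (by decide) _ _ _ le_rfl (by simp)] at hbody
                exact h4 (by rw [List.isPrefixOf_iff_prefix, tokBS, List.cons_prefix_cons]; exact ⟨hcc, hbody⟩)
              rw [chainR, hSP,
                rep1_cons_of_not_prefix _ _ _ _ hENpre,
                rep1_cons_of_not_prefix _ _ _ _ hTBpre,
                rep1_cons_of_not_prefix _ _ _ _ hBSpre,
                hihr, scanKeys_cons, if_neg h1, if_neg h2, if_neg h3, if_neg h4]

-- ===== VERDICT (by name: the statement is the Claim_ definition above) =====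
theorem clean_keystrokes_spec : Claim_equal_clean_keystrokes := by
  intro raw _
  unfold Spec_clean_keystrokes clean_keystrokes clean_keystrokes_alt
  simp only [PySem.Str.replace, String.toList_ofList]
  rw [replace_eq_rep1 _ _ _ (by decide), replace_eq_rep1 _ _ _ (by decide),
    replace_eq_rep1 _ _ _ (by decide), replace_eq_rep1 _ _ _ (by decide)]
  have h := chain_eq_scan raw.toList.length raw.toList le_rfl
  rw [chainR] at h
  have e1 : "[SPACE]".toList = tokSP := by decide
  have e2 : "[ENTER]".toList = tokEN := by decide
  have e3 : "[TAB]".toList = tokTB := by decide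
  have e4 : "[BACKSPACE]".toList = tokBS := by decide
  have e5 : " ".toList = [' '] := by decide
  have e6 : "\n".toList = ['\n'] := by decide
  have e7 : "\t".toList = ['\t'] := by decide
  have e8 : "".toList = ([] : List Char) := by decide
  rw [e1, e2, e3, e4, e5, e6, e7, e8, h]
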